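-- pv_equiv track=rewrite | github.com/ihgazni2/dlixhict-didactic | xdict/elist.py | copy_within
-- ===== SOURCE A (Python) =====
-- def uniform_index(index,length):
--     '''
--         uniform_index(0,3)
--         uniform_index(-1,3)
--         uniform_index(-4,3)
--         uniform_index(-3,3)
--         uniform_index(5,3)
--     '''
--     if(index<0):
--         rl = length+index
--         if(rl<0):
--             index = 0
--         else:
--             index = rl
--     elif(index>=length):
--         index = length
--     else:
--         index = index
--     return(index)
--
-- def copy_within(ol,target, start=None, end=None):
--     '''
--         from xdict.elist import *
--         ol = [1, 2, 3, 4, 5]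
--         id(ol)
--         rslt = copyWithin(ol,0,3,4)
--         rslt
--         id(rslt)
--         ####
--         ol = [1, 2, 3, 4, 5]
--         id(ol)
--         rslt = copyWithin(ol,0,3)
--         rslt
--         id(rslt)
--         ####
--         ol = [1, 2, 3, 4, 5]
--         id(ol)
--         rslt = copyWithin(ol,-2)
--         rslt
--         id(rslt)
--         ####copyWithin is the same as copy_within
--     '''
--     length = ol.__len__()
--     if(start==None):
--         start = 0
--     else:
--         pass
--     if(end==None):
--         end = length
--     else:
--         pass
--     target = uniform_index(target,length)
--     start = uniform_index(start,length)
--     end = uniform_index(end,length)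
--     cplen = end - start
--     cpend = target+cplen
--     if(target+cplen > length):
--         cpend = length
--     else:
--         pass
--     shift = start - target
--     if(shift>=0):
--         for i in range(target,cpend):
--             ol[i] = ol[i+shift]
--     else:
--         for i in range(cpend-1,target-1,-1):
--             ol[i] = ol[i+shift]
--     return(ol)
-- ===== SOURCE B (Python) =====
-- def copy_within(ol, target, start=None, end=None):
--     n = len(ol)
--     t = max(0, min(target + n if target < 0 else target, n))
--     src = ol[start:end][: n - t]
--     ol[t:t + len(src)] = src
--     return ol
-- ===== Notes on version B (the rewrite author's own statement) =====
-- stated objective: simpler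
-- what changed: A's forward/backward overlap-direction branch with element-by-element index loops is replaced by one bulk slice assignment from a snapshot copy of the source slice (Python's slice semantics supply the clamping that A computes via uniform_index).
import Mathlib
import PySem

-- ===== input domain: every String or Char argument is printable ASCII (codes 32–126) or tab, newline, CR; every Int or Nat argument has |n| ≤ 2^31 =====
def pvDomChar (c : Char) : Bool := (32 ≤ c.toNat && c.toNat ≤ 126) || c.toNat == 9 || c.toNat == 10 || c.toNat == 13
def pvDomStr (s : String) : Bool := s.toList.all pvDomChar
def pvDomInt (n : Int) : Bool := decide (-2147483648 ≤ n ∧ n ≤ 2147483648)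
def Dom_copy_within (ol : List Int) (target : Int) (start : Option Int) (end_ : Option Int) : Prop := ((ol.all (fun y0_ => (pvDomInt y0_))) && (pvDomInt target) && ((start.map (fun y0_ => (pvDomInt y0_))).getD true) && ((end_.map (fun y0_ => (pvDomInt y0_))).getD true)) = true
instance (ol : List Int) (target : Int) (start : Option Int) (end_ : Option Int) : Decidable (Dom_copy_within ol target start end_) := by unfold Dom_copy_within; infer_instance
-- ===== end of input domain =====

-- B replaces A's two directional element-by-element copy loops by one bulk splice of a snapshot
-- of the source slice (simpler: no overlap-direction branch). In Python both A and B mutate ol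
-- in place with the same final contents; the equivalence proved here is about the return value.

-- ===== PORT A =====
def uniform_index (index : Int) (length : Int) : Int :=
  if index < 0 then
    let rl := length + index
    if rl < 0 then 0 else rl
  else if index ≥ length then length
  else index

def copy_within (ol : List Int) (target : Int) (start : Option Int) (end_ : Option Int) : List Int :=
  let length : Int := ol.length
  let start : Int := match start with | none => 0 | some s => s
  let end' : Int := match end_ with | none => length | some e => e
  let target := uniform_index target length
  let start := uniform_index start length
  let end' := uniform_index end' length
  let cplen := end' - start
  let cpend := target + cplen
  let cpend := if target + cplen > length then length else cpend
  let shift := start - target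
  if shift ≥ 0 then
    (PySem.List.pyRange target cpend 1).foldl
      (fun l i => PySem.List.pySetD l i (PySem.List.pyGetD l (i + shift) 0)) ol
  else
    (PySem.List.pyRange (cpend - 1) (target - 1) (-1)).foldl
      (fun l i => PySem.List.pySetD l i (PySem.List.pyGetD l (i + shift) 0)) ol

-- ===== PORT B =====
def copy_within_alt (ol : List Int) (target : Int) (start : Option Int) (end_ : Option Int) : List Int :=
  let n : Int := ol.length
  let t : Int := max 0 (min (if target < 0 then target + n else target) n)
  let src := (PySem.List.slice ol start end_).take (n - t).toNat
  ol.take t.toNat ++ src ++ ol.drop (t.toNat + src.length)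

-- ===== PRECONDITION & SPEC =====
def Spec_copy_within (ol : List Int) (target : Int) (start : Option Int) (end_ : Option Int) (out : List Int) : Prop := out = copy_within_alt ol target start end_
instance (ol : List Int) (target : Int) (start : Option Int) (end_ : Option Int) (out : List Int) : Decidable (Spec_copy_within ol target start end_ out) := by unfold Spec_copy_within; infer_instance

-- ===== CLAIM (what is proved, stated in full; the proofs are below) =====
def Claim_equal_copy_within : Prop := ∀ (ol : List Int) (target : Int) (start : Option Int) (end_ : Option Int), Dom_copy_within ol target start end_ → Spec_copy_within ol target start end_ (copy_within ol target start end_)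

-- ===== LEMMAS AND PROOFS =====

-- uniform_index with its local let, written out flat
lemma uniform_eq (i L : Int) :
    uniform_index i L = if i < 0 then (if L + i < 0 then 0 else L + i) else if i ≥ L then L else i := rfl

-- the clamp as a natural number
def uclamp (i : Int) (l : Nat) : Nat := (uniform_index i (l : Int)).toNat

lemma uclamp_cast (i : Int) (l : Nat) : uniform_index i (l : Int) = ((uclamp i l : Nat) : Int) := by
  unfold uclamp; rw [uniform_eq]; split_ifs <;> omega

lemma uclamp_le (i : Int) (l : Nat) : uclamp i l ≤ l := by
  unfold uclamp; rw [uniform_eq]; split_ifs <;> omega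

lemma uclamp_zero (l : Nat) : uclamp 0 l = 0 := by
  unfold uclamp; rw [uniform_eq]; split_ifs <;> omega

lemma uclamp_len (l : Nat) : uclamp (l : Int) l = l := by
  unfold uclamp; rw [uniform_eq]; split_ifs <;> omega

-- Python's slice clamping coincides with uniform_index
lemma clampIdx_eq_uclamp (l : Nat) (i : Int) : PySem.List.clampIdx l i = uclamp i l := by
  rcases le_or_gt 0 i with hi | hi
  · rw [show i = ((i.toNat : Nat) : Int) by omega, PySem.List.clampIdx_natCast]
    unfold uclamp; rw [uniform_eq]; split_ifs <;> omega
  · rw [show i = -(((-i).toNat : Nat) : Int) by omega,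
      PySem.List.clampIdx_neg_natCast l (-i).toNat (by omega)]
    unfold uclamp; rw [uniform_eq]; split_ifs <;> omega

lemma slice_eq (ol : List Int) (s e : Option Int) :
    PySem.List.slice ol s e
    = (ol.drop (uclamp (s.getD 0) ol.length)).take
        (uclamp (e.getD (ol.length : Int)) ol.length - uclamp (s.getD 0) ol.length) := by
  rcases s with _ | s <;> rcases e with _ | e <;>
    simp [PySem.List.slice, clampIdx_eq_uclamp, uclamp_zero, uclamp_len]

-- B's arithmetic clamp of the target is uniform_index
lemma tB_eq (target : Int) (l : Nat) :
    max 0 (min (if target < 0 then target + (l : Int) else target) (l : Int))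
    = uniform_index target (l : Int) := by
  rw [uniform_eq, max_def, min_def]; split_ifs <;> omega

lemma pyRange_one_nil {a b : Int} (h : b ≤ a) : PySem.List.pyRange a b 1 = [] := by
  simp [PySem.List.pyRange, show ¬ a < b by omega]

lemma pyRange_neg_one_nil {a b : Int} (h : a ≤ b) : PySem.List.pyRange a b (-1) = [] := by
  simp [PySem.List.pyRange, show ¬ b < a by omega]

-- pyRange with step -1 peels its largest element in front
lemma pyRange_neg_one_cons {a b : Int} (h : b < a) :
    PySem.List.pyRange a b (-1) = a :: PySem.List.pyRange (a - 1) b (-1) := by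
  simp only [PySem.List.pyRange]
  norm_num [h]
  rcases lt_or_ge b (a - 1) with h1 | h1
  · have : a - b = (a - 1 - b) + 1 := by ring
    rw [if_pos h1, this]
    have hn : ((a - 1 - b) + 1).toNat = (a - 1 - b).toNat + 1 := by omega
    rw [hn, List.range_succ_eq_map, List.map_cons, List.map_map]
    refine congrArg₂ _ (by norm_num) ?_
    apply List.map_congr_left; intro k _; simp [Function.comp]; ring
  · have hb : b = a - 1 := by omega
    rw [if_neg (by omega)]
    subst hb
    simp [show a - (a - 1) = 1 by ring]

-- The forward copy loop (shift ≥ 0) equals a splice of the snapshot source block.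
lemma fwd_loop (k : Nat) : ∀ (L : List Int) (t sh : Nat), t + k + sh ≤ L.length →
    (PySem.List.pyRange (t : Int) ((t : Int) + (k : Int)) 1).foldl
      (fun l i => PySem.List.pySetD l i (PySem.List.pyGetD l (i + (sh : Int)) 0)) L
    = L.take t ++ (L.drop (t + sh)).take k ++ L.drop (t + k) := by
  induction k with
  | zero =>
    intro L t sh h
    rw [pyRange_one_nil (by omega)]
    simp
  | succ k ih =>
    intro L t sh h
    have hts : t + sh < L.length := by omega
    have ht : t < L.length := by omega
    rw [PySem.List.pyRange_one_cons (by omega : (t : Int) < (t : Int) + ((k+1 : Nat) : Int))]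
    rw [List.foldl_cons]
    have hget : PySem.List.pyGetD L ((t : Int) + (sh : Int)) 0 = L[t + sh] := by
      rw [PySem.List.pyGetD_eq_getElem L 0 (by omega) (by omega)]
      congr 1
    have hset : PySem.List.pySetD L (t : Int) (L[t + sh]) = L.set t (L[t + sh]) := by
      rw [PySem.List.pySetD_of_nonneg L _ (by omega)]
      congr 1
    rw [hget, hset]
    have hcast : (t : Int) + 1 = ((t + 1 : Nat) : Int) := by push_cast; ring
    have hcast2 : (t : Int) + ((k+1 : Nat) : Int) = ((t + 1 : Nat) : Int) + (k : Nat) := by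
      push_cast; ring
    rw [hcast2, hcast]
    rw [ih (L.set t (L[t + sh])) (t+1) sh (by simp; omega)]
    have hL' : L.set t (L[t + sh]) = L.take t ++ L[t + sh] :: L.drop (t+1) := by
      rw [List.set_eq_take_append_cons_drop]
      simp [ht]
    rw [hL']
    have h1 : (L.take t ++ L[t + sh] :: L.drop (t+1)).take (t+1)
        = L.take t ++ [L[t + sh]] := by
      rw [List.take_append]
      simp [List.length_take, Nat.min_eq_left (le_of_lt ht)]
    have h2 : ∀ m, t + 1 ≤ m → (L.take t ++ L[t + sh] :: L.drop (t+1)).drop m = L.drop m := by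
      intro m hm
      have hp : (L.take t ++ L[t + sh] :: L.drop (t+1)) = (L.take t ++ [L[t + sh]]) ++ L.drop (t+1) := by simp
      have hlp : (L.take t ++ [L[t + sh]]).length = t + 1 := by
        simp [Nat.min_eq_left (le_of_lt ht)]
      rw [hp, List.drop_append, List.drop_eq_nil_of_le (by rw [hlp]; omega),
        List.nil_append, hlp, List.drop_drop]
      congr 1; omega
    rw [h1, h2 _ (by omega), h2 _ (by omega)]
    have h3 : (L.drop (t + sh)).take (k+1) = L[t + sh] :: (L.drop (t + 1 + sh)).take k := by
      rw [List.drop_eq_getElem_cons hts]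
      simp [show t + sh + 1 = t + 1 + sh by omega]
    rw [h3]
    simp [show t + 1 + k = t + (k+1) by omega]

-- The backward copy loop (shift = -sh < 0) equals the same splice.
lemma bwd_loop (k : Nat) : ∀ (L : List Int) (t sh : Nat), 1 ≤ sh → sh ≤ t → t + k ≤ L.length →
    (PySem.List.pyRange ((t : Int) + (k : Int) - 1) ((t : Int) - 1) (-1)).foldl
      (fun l i => PySem.List.pySetD l i (PySem.List.pyGetD l (i - (sh : Int)) 0)) L
    = L.take t ++ (L.drop (t - sh)).take k ++ L.drop (t + k) := by
  induction k with
  | zero =>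
    intro L t sh h1 h2 h3
    rw [pyRange_neg_one_nil (by omega)]
    simp
  | succ k ih =>
    intro L t sh h1 h2 h3
    have htk : t + k < L.length := by omega
    have hread : t + k - sh < L.length := by omega
    rw [show (t : Int) + ((k+1 : Nat) : Int) - 1 = ((t + k : Nat) : Int) by push_cast; ring]
    rw [pyRange_neg_one_cons (by push_cast; omega)]
    rw [List.foldl_cons]
    have hget : PySem.List.pyGetD L (((t + k : Nat) : Int) - (sh : Int)) 0 = L[t + k - sh] := by
      rw [PySem.List.pyGetD_eq_getElem L 0 (by push_cast; omega) (by push_cast; omega)]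
      congr 1; omega
    have hset : PySem.List.pySetD L ((t + k : Nat) : Int) (L[t + k - sh]) = L.set (t + k) (L[t + k - sh]) := by
      rw [PySem.List.pySetD_of_nonneg L _ (by positivity)]
      congr 1
    rw [hget, hset]
    rw [show ((t + k : Nat) : Int) - 1 = (t : Int) + (k : Int) - 1 by push_cast; ring]
    rw [ih (L.set (t+k) (L[t + k - sh])) t sh h1 h2 (by simp; omega)]
    have hL' : L.set (t+k) (L[t + k - sh]) = L.take (t+k) ++ L[t + k - sh] :: L.drop (t+k+1) := by
      rw [List.set_eq_take_append_cons_drop]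
      simp [htk]
    rw [hL']
    have hlp : (L.take (t+k)).length = t + k := by simp [Nat.min_eq_left (le_of_lt htk)]
    have h1' : (L.take (t+k) ++ L[t + k - sh] :: L.drop (t+k+1)).take t = L.take t := by
      rw [List.take_append, hlp, show t - (t+k) = 0 by omega]
      simp [List.take_take]
    have h2' : ((L.take (t+k) ++ L[t + k - sh] :: L.drop (t+k+1)).drop (t - sh)).take k
        = (L.drop (t - sh)).take k := by
      rw [List.drop_append, hlp, show t - sh - (t+k) = 0 by omega]
      rw [List.take_append]
      have hdl : ((L.take (t+k)).drop (t - sh)).length = k + sh := by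
        simp [hlp]; omega
      rw [hdl, show k - (k + sh) = 0 by omega]
      simp [List.drop_take]
      rw [List.take_take]
      congr 1
      omega
    have h3' : (L.take (t+k) ++ L[t + k - sh] :: L.drop (t+k+1)).drop (t+k)
        = L[t + k - sh] :: L.drop (t+k+1) := by
      rw [List.drop_append, hlp]
      simp
    rw [h1', h2', h3']
    have h4 : (L.drop (t - sh)).take (k+1) = (L.drop (t - sh)).take k ++ [L[t + k - sh]] := by
      rw [List.take_add_one]
      congr 1
      have : (L.drop (t - sh))[k]? = some (L[t + k - sh]) := by
        rw [List.getElem?_drop, show t - sh + k = t + k - sh by omega,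
          List.getElem?_eq_getElem (by omega)]
      simp [this]
    rw [h4]
    simp [show t + (k+1) = t + k + 1 by omega]

-- A's whole clamped directional copy, as a function of the three clamped indices.
lemma core (ol : List Int) (tN sN eN : Nat) (ht : tN ≤ ol.length) (_hs : sN ≤ ol.length)
    (he : eN ≤ ol.length) :
    (if ((sN : Int) - tN) ≥ 0 then
      (PySem.List.pyRange (tN : Int)
          (if ((tN : Int) + ((eN : Int) - sN)) > (ol.length : Int) then (ol.length : Int)
           else (tN : Int) + ((eN : Int) - sN)) 1).foldl
        (fun l i => PySem.List.pySetD l i (PySem.List.pyGetD l (i + ((sN : Int) - tN)) 0)) ol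
     else
      (PySem.List.pyRange
          ((if ((tN : Int) + ((eN : Int) - sN)) > (ol.length : Int) then (ol.length : Int)
            else (tN : Int) + ((eN : Int) - sN)) - 1) ((tN : Int) - 1) (-1)).foldl
        (fun l i => PySem.List.pySetD l i (PySem.List.pyGetD l (i + ((sN : Int) - tN)) 0)) ol)
    = ol.take tN ++ (ol.drop sN).take (min (eN - sN) (ol.length - tN))
        ++ ol.drop (tN + min (eN - sN) (ol.length - tN)) := by
  set l := ol.length with hl
  set k := min (eN - sN) (l - tN) with hk
  by_cases hse : sN ≤ eN
  · have hcp : (if ((tN : Int) + ((eN : Int) - sN)) > (l : Int) then (l : Int)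
        else (tN : Int) + ((eN : Int) - sN)) = ((tN + k : Nat) : Int) := by
      split_ifs <;> (push_cast; omega)
    rw [hcp]
    by_cases hst : tN ≤ sN
    · rw [if_pos (by omega)]
      rw [show ((sN : Int) - tN) = ((sN - tN : Nat) : Int) by omega]
      rw [show ((tN + k : Nat) : Int) = (tN : Int) + (k : Int) by push_cast; ring]
      rw [fwd_loop k ol tN (sN - tN) (by omega)]
      rw [show tN + (sN - tN) = sN by omega]
    · rw [if_neg (by omega)]
      rw [show ((sN : Int) - tN) = -(((tN - sN : Nat) : Nat) : Int) by omega]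
      rw [show ((tN + k : Nat) : Int) - 1 = (tN : Int) + (k : Int) - 1 by push_cast; ring]
      simp only [← Int.sub_eq_add_neg]
      rw [bwd_loop k ol tN (tN - sN) (by omega) (by omega) (by omega)]
      rw [show tN - (tN - sN) = sN by omega]
  · have hk0 : k = 0 := by omega
    rw [if_neg (by omega : ¬ ((tN : Int) + ((eN : Int) - sN)) > (l : Int))]
    rw [hk0]
    simp only [List.take_zero, List.append_nil, Nat.add_zero]
    by_cases hst : tN ≤ sN
    · by_cases h0 : (sN : Int) - tN ≥ 0
      · rw [if_pos h0, pyRange_one_nil (by omega)]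
        simp
      · rw [if_neg h0, pyRange_neg_one_nil (by omega)]
        simp
    · rw [if_neg (by omega), pyRange_neg_one_nil (by omega)]
      simp

-- A reduced to core's left-hand side
lemma A_eq (ol : List Int) (target : Int) (start end_ : Option Int) :
    copy_within ol target start end_
    = (if (((uclamp (start.getD 0) ol.length : Nat) : Int) - (uclamp target ol.length : Nat)) ≥ 0 then
      (PySem.List.pyRange ((uclamp target ol.length : Nat) : Int)
          (if (((uclamp target ol.length : Nat) : Int) + (((uclamp (end_.getD (ol.length : Int)) ol.length : Nat) : Int) - (uclamp (start.getD 0) ol.length : Nat))) > (ol.length : Int) then (ol.length : Int)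
           else ((uclamp target ol.length : Nat) : Int) + (((uclamp (end_.getD (ol.length : Int)) ol.length : Nat) : Int) - (uclamp (start.getD 0) ol.length : Nat))) 1).foldl
        (fun l i => PySem.List.pySetD l i (PySem.List.pyGetD l (i + (((uclamp (start.getD 0) ol.length : Nat) : Int) - (uclamp target ol.length : Nat))) 0)) ol
     else
      (PySem.List.pyRange
          ((if (((uclamp target ol.length : Nat) : Int) + (((uclamp (end_.getD (ol.length : Int)) ol.length : Nat) : Int) - (uclamp (start.getD 0) ol.length : Nat))) > (ol.length : Int) then (ol.length : Int)
            else ((uclamp target ol.length : Nat) : Int) + (((uclamp (end_.getD (ol.length : Int)) ol.length : Nat) : Int) - (uclamp (start.getD 0) ol.length : Nat))) - 1) (((uclamp target ol.length : Nat) : Int) - 1) (-1)).foldl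
        (fun l i => PySem.List.pySetD l i (PySem.List.pyGetD l (i + (((uclamp (start.getD 0) ol.length : Nat) : Int) - (uclamp target ol.length : Nat))) 0)) ol) := by
  rcases start with _ | s <;> rcases end_ with _ | e <;>
    simp only [copy_within, Option.getD] <;>
    rw [uclamp_cast, uclamp_cast, uclamp_cast]

-- B reduced to the splice normal form
lemma B_eq (ol : List Int) (target : Int) (start end_ : Option Int) :
    copy_within_alt ol target start end_
    = ol.take (uclamp target ol.length)
        ++ (ol.drop (uclamp (start.getD 0) ol.length)).take
             (min (uclamp (end_.getD (ol.length : Int)) ol.length - uclamp (start.getD 0) ol.length)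
                  (ol.length - uclamp target ol.length))
        ++ ol.drop (uclamp target ol.length
             + min (uclamp (end_.getD (ol.length : Int)) ol.length - uclamp (start.getD 0) ol.length)
                   (ol.length - uclamp target ol.length)) := by
  have htl := uclamp_le target ol.length
  have hsl := uclamp_le (start.getD 0) ol.length
  have hel := uclamp_le (end_.getD (ol.length : Int)) ol.length
  simp only [copy_within_alt, tB_eq, uclamp_cast, Int.toNat_natCast, slice_eq]
  rw [show (((ol.length : Nat) : Int) - ((uclamp target ol.length : Nat) : Int)).toNat
      = ol.length - uclamp target ol.length by omega]
  rw [List.take_take]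
  rw [show min (ol.length - uclamp target ol.length)
        (uclamp (end_.getD (ol.length : Int)) ol.length - uclamp (start.getD 0) ol.length)
      = min (uclamp (end_.getD (ol.length : Int)) ol.length - uclamp (start.getD 0) ol.length)
        (ol.length - uclamp target ol.length) by omega]
  congr 2
  simp [List.length_take, List.length_drop]
  omega

-- ===== VERDICT (by name: the statement is the Claim_ definition above) =====
theorem copy_within_spec : Claim_equal_copy_within := by
  intro ol target start end_ _
  unfold Spec_copy_within
  rw [A_eq, B_eq,
    core ol (uclamp target ol.length) (uclamp (start.getD 0) ol.length)
      (uclamp (end_.getD (ol.length : Int)) ol.length)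
      (uclamp_le _ _) (uclamp_le _ _) (uclamp_le _ _)]
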